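-- pv_equiv track=rewrite | github.com/CUB3D/Advent-of-Code | 2024/day21/p2.py | next_key
-- ===== SOURCE A (Python) =====
-- def next_key(k, x, y, p):
--     i = y * 3 + x
--     for direction in p:
--         if direction == "<":
--             i -= 1
--         if direction == ">":
--             i += 1
--         if direction == "^":
--             i -= 3
--         if direction == "v":
--             i += 3
--         yield k[i]
-- ===== SOURCE B (Python) =====
-- def next_key(k, x, y, p):
--     # Stateless re-implementation: no running index at all. The index after
--     # consuming the first j+1 moves is a closed form of character counts of
--     # that prefix: start + (#'>' - #'<') + 3*(#'v' - #'^').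
--     start = y * 3 + x
--     for j in range(len(p)):
--         pre = p[:j + 1]
--         i = start + pre.count(">") - pre.count("<") + 3 * (pre.count("v") - pre.count("^"))
--         yield k[i]
-- ===== Notes on version B (the rewrite author's own statement) =====
-- stated objective: alternative
-- what changed: B removes A's running-index state machine entirely: each emitted key's index is computed independently by a closed-form count formula over the prefix of moves (start + #'>' - #'<' + 3*(#'v' - #'^')), trading the single stateful pass for stateless per-position counting.
import Mathlib
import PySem

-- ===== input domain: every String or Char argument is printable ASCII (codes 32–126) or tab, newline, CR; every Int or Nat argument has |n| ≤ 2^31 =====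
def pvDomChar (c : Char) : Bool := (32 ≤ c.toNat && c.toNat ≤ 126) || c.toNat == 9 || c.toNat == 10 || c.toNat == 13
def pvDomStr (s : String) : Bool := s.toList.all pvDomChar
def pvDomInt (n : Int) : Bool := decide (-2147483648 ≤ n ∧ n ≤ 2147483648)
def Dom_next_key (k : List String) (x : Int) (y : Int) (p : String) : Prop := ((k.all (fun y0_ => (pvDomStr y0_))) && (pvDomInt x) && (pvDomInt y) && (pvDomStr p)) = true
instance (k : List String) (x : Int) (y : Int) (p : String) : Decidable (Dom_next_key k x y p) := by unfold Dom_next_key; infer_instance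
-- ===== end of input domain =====

-- B drops A's running-index state: each key's index is a stateless closed-form count formula over the move prefix; same return value (A is a generator — equivalence is about the materialised sequence), not faster.

-- ===== PORT A =====
-- loop body of A: the four sequential ifs updating i
def nkStep (i : Int) (direction : Char) : Int :=
  let i := if direction = '<' then i - 1 else i
  let i := if direction = '>' then i + 1 else i
  let i := if direction = '^' then i - 3 else i
  if direction = 'v' then i + 3 else i

def next_key (k : List String) (x : Int) (y : Int) (p : String) : List String :=
  (p.toList.foldl
    (fun (st : Int × List String) direction =>
      let i := nkStep st.1 direction
      (i, st.2 ++ [(PySem.List.pyGet? k i).getD ""]))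
    (y * 3 + x, [])).2

-- ===== PORT B =====
-- range(len(p)) is ported as List.range (exact: the length is a Nat); p[:j+1] as take, str.count of a single char as List.count
def next_key_alt (k : List String) (x : Int) (y : Int) (p : String) : List String :=
  let cs := p.toList
  let start := y * 3 + x
  (List.range cs.length).map (fun j =>
    let pre := cs.take (j + 1)
    let i := start + (pre.count '>' : Int) - (pre.count '<' : Int) + 3 * ((pre.count 'v' : Int) - (pre.count '^' : Int))
    (PySem.List.pyGet? k i).getD "")

-- ===== PRECONDITION & SPEC =====
-- helper for Pre_: the per-character index delta and the sequence of indices the Python looks up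
def pvDelta (c : Char) : Int :=
  if c = '<' then -1 else if c = '>' then 1 else if c = '^' then -3 else if c = 'v' then 3 else 0

def pvScan (i : Int) (cs : List Char) : List Int :=
  match cs with
  | [] => []
  | c :: cs => (i + pvDelta c) :: pvScan (i + pvDelta c) cs

-- Pre_ excludes exactly the inputs where Python's k[i] raises IndexError (some looked-up index outside [-len k, len k)); negative in-range indices wrap and are admitted.
def Pre_next_key (k : List String) (x : Int) (y : Int) (p : String) : Prop :=
  ∀ j ∈ pvScan (y * 3 + x) p.toList, -(k.length : Int) ≤ j ∧ j < k.length
instance (k : List String) (x : Int) (y : Int) (p : String) : Decidable (Pre_next_key k x y p) := by unfold Pre_next_key; infer_instance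

def pvWitness_next_key : List String × Int × Int × String := (["A", "B", "C"], 1, 0, "<>")

def Spec_next_key (k : List String) (x : Int) (y : Int) (p : String) (out : List String) : Prop := out = next_key_alt k x y p
instance (k : List String) (x : Int) (y : Int) (p : String) (out : List String) : Decidable (Spec_next_key k x y p out) := by unfold Spec_next_key; infer_instance

-- ===== CLAIM (what is proved, stated in full; the proofs are below) =====
def Claim_equal_next_key : Prop := ∀ (k : List String) (x : Int) (y : Int) (p : String), Dom_next_key k x y p → Pre_next_key k x y p → Spec_next_key k x y p (next_key k x y p)

-- ===== LEMMAS AND PROOFS =====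

lemma nkStep_eq (c : Char) (i : Int) : nkStep i c = i + pvDelta c := by
  simp only [nkStep, pvDelta]
  split_ifs <;> simp_all <;> omega

-- A's fold emits exactly the keys at the scanned indices
lemma foldA_eq (k : List String) (cs : List Char) (i : Int) (acc : List String) :
    (cs.foldl
      (fun (st : Int × List String) direction =>
        let i := nkStep st.1 direction
        (i, st.2 ++ [(PySem.List.pyGet? k i).getD ""]))
      (i, acc)).2
    = acc ++ (pvScan i cs).map (fun j => (PySem.List.pyGet? k j).getD "") := by
  induction cs generalizing i acc with
  | nil => simp [pvScan]
  | cons c cs ih =>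
    simp only [List.foldl, pvScan, List.map, nkStep_eq] at ih ⊢
    rw [ih]
    simp

-- sum of deltas over a prefix
def pvSumD (cs : List Char) : Int := (cs.map pvDelta).sum

lemma pvSumD_cons (c : Char) (cs : List Char) : pvSumD (c :: cs) = pvDelta c + pvSumD cs := by
  simp [pvSumD]

-- the scan as per-position prefix sums
lemma scan_eq_range (cs : List Char) (i : Int) :
    pvScan i cs = (List.range cs.length).map (fun j => i + pvSumD (cs.take (j + 1))) := by
  induction cs generalizing i with
  | nil => simp [pvScan]
  | cons c cs ih =>
    simp only [pvScan, List.length_cons, List.range_succ_eq_map, List.map_cons, List.map_map]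
    rw [ih (i + pvDelta c)]
    congr 1
    · simp [pvSumD]
    · apply List.map_congr_left
      intro j _
      simp [Function.comp, List.take_succ_cons, pvSumD_cons]
      ring

-- the delta sum is the count formula
lemma sumD_counts (cs : List Char) :
    pvSumD cs = (cs.count '>' : Int) - (cs.count '<' : Int)
      + 3 * ((cs.count 'v' : Int) - (cs.count '^' : Int)) := by
  induction cs with
  | nil => simp [pvSumD]
  | cons c cs ih =>
    rw [pvSumD_cons, ih]
    simp only [List.count_cons]
    by_cases h1 : c = '<' <;> by_cases h2 : c = '>' <;> by_cases h3 : c = '^' <;> by_cases h4 : c = 'v' <;>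
      simp_all [pvDelta] <;> ring

-- ===== VERDICT (by name: the statement is the Claim_ definition above) =====
theorem next_key_spec : Claim_equal_next_key := by
  intro k x y p _ _
  show next_key k x y p = next_key_alt k x y p
  rw [next_key, next_key_alt, foldA_eq, scan_eq_range]
  simp only [List.map_map]
  apply List.map_congr_left
  intro j _
  simp only [Function.comp, sumD_counts]
  ring_nf
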